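-- pv_equiv track=rewrite | github.com/dha8102/Convolutional-Neural-Networks-for-Sentence-Classification | MPQA/MPQAtrain.py | dev_split
-- ===== SOURCE A (Python) =====
-- def dev_split(x_train, y_train, thiscv, devlen):
--     x_dev = []
--     y_dev = []
--     new_x_train = []
--     new_y_train = []
--     for i in range(len(x_train)):
--         if thiscv * devlen <= i < (thiscv + 1) * devlen:
--             x_dev.append(x_train[i])
--             y_dev.append(y_train[i])
--         else:
--             new_x_train.append(x_train[i])
--             new_y_train.append(y_train[i])
--     return new_x_train, new_y_train, x_dev, y_dev
-- ===== SOURCE B (Python) =====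
-- def dev_split(x_train, y_train, thiscv, devlen):
--     start = thiscv * devlen
--     end = start + devlen
--     new_x_train = x_train[:start] + x_train[end:]
--     new_y_train = y_train[:start] + y_train[end:]
--     return new_x_train, new_y_train, x_train[start:end], y_train[start:end]
-- ===== Notes on version B (the rewrite author's own statement) =====
-- stated objective: simpler
-- what changed: replaces the per-index branching loop with four slice-and-concatenate expressions; Pre_ restricts to the natural domain (equally long paired lists, non-negative fold index and fold length), outside which A raises IndexError or its values (silently dropping y_train's tail, negative-product windows) are accidents of looping over len(x_train)
-- outside the precondition, e.g. on dev_split([[1]], [[2], [3]], 0, 1): A returns ([], [], [[1]], [[2]]), B returns ([], [[3]], [[1]], [[2]])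
import Mathlib
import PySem

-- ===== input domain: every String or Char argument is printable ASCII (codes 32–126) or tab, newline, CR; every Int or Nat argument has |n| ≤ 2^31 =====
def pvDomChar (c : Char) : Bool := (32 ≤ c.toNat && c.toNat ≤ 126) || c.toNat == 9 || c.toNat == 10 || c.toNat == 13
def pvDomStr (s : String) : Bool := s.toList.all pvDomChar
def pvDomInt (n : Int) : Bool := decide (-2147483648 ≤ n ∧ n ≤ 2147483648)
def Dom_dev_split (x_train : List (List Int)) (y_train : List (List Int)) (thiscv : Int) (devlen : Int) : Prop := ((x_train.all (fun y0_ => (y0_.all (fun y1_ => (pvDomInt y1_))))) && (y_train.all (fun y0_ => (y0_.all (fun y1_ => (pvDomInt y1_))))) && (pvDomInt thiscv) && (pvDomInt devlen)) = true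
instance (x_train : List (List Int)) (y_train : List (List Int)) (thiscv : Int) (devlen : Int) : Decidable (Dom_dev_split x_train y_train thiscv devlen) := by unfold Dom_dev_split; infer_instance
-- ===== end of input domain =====

-- B replaces A's per-index branching loop by four slice-and-concatenate expressions
-- (objective: simpler). Equivalence is about return values; neither mutates its arguments.

-- ===== PORT A =====
-- index access ported with pyGetD: exact on Pre_ (every accessed index is in range there)
def dev_split (x_train : List (List Int)) (y_train : List (List Int)) (thiscv : Int) (devlen : Int) : List (List Int) × List (List Int) × List (List Int) × List (List Int) :=
  (PySem.List.pyRange 0 (x_train.length : Int) 1).foldl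
    (fun st i =>
      if thiscv * devlen ≤ i ∧ i < (thiscv + 1) * devlen then
        (st.1, st.2.1, st.2.2.1 ++ [PySem.List.pyGetD x_train i []],
         st.2.2.2 ++ [PySem.List.pyGetD y_train i []])
      else
        (st.1 ++ [PySem.List.pyGetD x_train i []],
         st.2.1 ++ [PySem.List.pyGetD y_train i []], st.2.2.1, st.2.2.2))
    ([], [], [], [])

-- ===== PORT B =====
def dev_split_alt (x_train : List (List Int)) (y_train : List (List Int)) (thiscv : Int) (devlen : Int) : List (List Int) × List (List Int) × List (List Int) × List (List Int) :=
  let start : Int := thiscv * devlen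
  let stop : Int := start + devlen
  (PySem.List.slice x_train none (some start) ++ PySem.List.slice x_train (some stop) none,
   PySem.List.slice y_train none (some start) ++ PySem.List.slice y_train (some stop) none,
   PySem.List.slice x_train (some start) (some stop),
   PySem.List.slice y_train (some start) (some stop))

-- ===== PRECONDITION & SPEC =====
-- Pre_ restricts to the function's natural domain: equally long paired lists and
-- non-negative fold index and fold length. Outside it A either raises IndexError
-- (y_train shorter than x_train) or its values are accidents of looping over
-- range(len(x_train)): y_train's tail silently dropped, negative-product windows.
def Pre_dev_split (x_train : List (List Int)) (y_train : List (List Int)) (thiscv : Int) (devlen : Int) : Prop := x_train.length = y_train.length ∧ 0 ≤ thiscv ∧ 0 ≤ devlen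
instance (x_train : List (List Int)) (y_train : List (List Int)) (thiscv : Int) (devlen : Int) : Decidable (Pre_dev_split x_train y_train thiscv devlen) := by unfold Pre_dev_split; infer_instance
def pvWitness_dev_split : List (List Int) × List (List Int) × Int × Int := ([[1], [2], [3]], [[4], [5], [6]], 1, 1)

def Spec_dev_split (x_train : List (List Int)) (y_train : List (List Int)) (thiscv : Int) (devlen : Int) (out : List (List Int) × List (List Int) × List (List Int) × List (List Int)) : Prop := out = dev_split_alt x_train y_train thiscv devlen
instance (x_train : List (List Int)) (y_train : List (List Int)) (thiscv : Int) (devlen : Int) (out : List (List Int) × List (List Int) × List (List Int) × List (List Int)) : Decidable (Spec_dev_split x_train y_train thiscv devlen out) := by unfold Spec_dev_split; infer_instance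

-- ===== CLAIM (what is proved, stated in full; the proofs are below) =====
def Claim_equal_dev_split : Prop := ∀ (x_train : List (List Int)) (y_train : List (List Int)) (thiscv : Int) (devlen : Int), Dom_dev_split x_train y_train thiscv devlen → Pre_dev_split x_train y_train thiscv devlen → Spec_dev_split x_train y_train thiscv devlen (dev_split x_train y_train thiscv devlen)

-- ===== LEMMAS AND PROOFS =====

-- loop invariant: after processing indices 0..n-1, the four accumulators are the
-- clamped-slice decomposition of the first n elements of each list
theorem dev_split_loop_inv (x_train y_train : List (List Int)) (thiscv devlen : Int)
    (n : Nat) (hx : n ≤ x_train.length) (hy : n ≤ y_train.length) :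
    (PySem.List.pyRange 0 (n : Int) 1).foldl
      (fun st i =>
        if thiscv * devlen ≤ i ∧ i < (thiscv + 1) * devlen then
          (st.1, st.2.1, st.2.2.1 ++ [PySem.List.pyGetD x_train i []],
           st.2.2.2 ++ [PySem.List.pyGetD y_train i []])
        else
          (st.1 ++ [PySem.List.pyGetD x_train i []],
           st.2.1 ++ [PySem.List.pyGetD y_train i []], st.2.2.1, st.2.2.2))
      ([], [], [], []) =
    ((x_train.take n).take (max 0 (thiscv * devlen)).toNat ++
       (x_train.take n).drop (max (max 0 (thiscv * devlen)) ((thiscv + 1) * devlen)).toNat,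
     (y_train.take n).take (max 0 (thiscv * devlen)).toNat ++
       (y_train.take n).drop (max (max 0 (thiscv * devlen)) ((thiscv + 1) * devlen)).toNat,
     ((x_train.take n).drop (max 0 (thiscv * devlen)).toNat).take
       ((max (max 0 (thiscv * devlen)) ((thiscv + 1) * devlen)).toNat - (max 0 (thiscv * devlen)).toNat),
     ((y_train.take n).drop (max 0 (thiscv * devlen)).toNat).take
       ((max (max 0 (thiscv * devlen)) ((thiscv + 1) * devlen)).toNat - (max 0 (thiscv * devlen)).toNat)) := by
  set L : Nat := (max 0 (thiscv * devlen)).toNat with hL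
  set H : Nat := (max (max 0 (thiscv * devlen)) ((thiscv + 1) * devlen)).toNat with hH
  have hLH : L ≤ H := by omega
  induction n with
  | zero =>
    rw [show ((0 : Nat) : Int) = 0 from rfl, PySem.List.pyRange_one_eq_nil le_rfl]
    simp
  | succ n ih =>
    have hx' : n ≤ x_train.length := Nat.le_of_succ_le hx
    have hy' : n ≤ y_train.length := Nat.le_of_succ_le hy
    have hxn : n < x_train.length := hx
    have hyn : n < y_train.length := hy
    have hrange : PySem.List.pyRange 0 ((n + 1 : Nat) : Int) 1
        = PySem.List.pyRange 0 (n : Int) 1 ++ [(n : Int)] := by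
      push_cast
      exact PySem.List.pyRange_one_succ_right (by positivity)
    rw [hrange, List.foldl_append, ih hx' hy']
    simp only [List.foldl_cons, List.foldl_nil]
    have hgx : PySem.List.pyGetD x_train (n : Int) [] = x_train[n] := by
      simp [PySem.List.pyGetD_natCast, List.getD_eq_getElem?_getD, hxn]
    have hgy : PySem.List.pyGetD y_train (n : Int) [] = y_train[n] := by
      simp [PySem.List.pyGetD_natCast, List.getD_eq_getElem?_getD, hyn]
    have htakex : x_train.take (n + 1) = x_train.take n ++ [x_train[n]] := by
      rw [List.take_add_one, List.getElem?_eq_getElem hxn]; rfl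
    have htakey : y_train.take (n + 1) = y_train.take n ++ [y_train[n]] := by
      rw [List.take_add_one, List.getElem?_eq_getElem hyn]; rfl
    set sx := x_train.take n with hsx
    set sy := y_train.take n with hsy
    have lx : sx.length = n := List.length_take_of_le hx'
    have ly : sy.length = n := List.length_take_of_le hy'
    rw [htakex, htakey]
    have hcond : (thiscv * devlen ≤ (n : Int) ∧ (n : Int) < (thiscv + 1) * devlen) ↔ (L ≤ n ∧ n < H) := by
      constructor <;> intro h <;> constructor <;> omega
    by_cases hc : thiscv * devlen ≤ (n : Int) ∧ (n : Int) < (thiscv + 1) * devlen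
    · -- element n goes to the dev fold
      obtain ⟨h1, h2⟩ := hcond.mp hc
      rw [if_pos hc]
      have tx : (sx ++ [x_train[n]]).take L = sx.take L :=
        List.take_append_of_le_length (by simp only [lx]; omega)
      have ty : (sy ++ [y_train[n]]).take L = sy.take L :=
        List.take_append_of_le_length (by simp only [ly]; omega)
      have dx : (sx ++ [x_train[n]]).drop H = [] :=
        List.drop_eq_nil_of_le (by simp only [List.length_append, List.length_cons, List.length_nil, lx]; omega)
      have dx0 : sx.drop H = [] := List.drop_eq_nil_of_le (by simp only [lx]; omega)
      have dy : (sy ++ [y_train[n]]).drop H = [] :=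
        List.drop_eq_nil_of_le (by simp only [List.length_append, List.length_cons, List.length_nil, ly]; omega)
      have dy0 : sy.drop H = [] := List.drop_eq_nil_of_le (by simp only [ly]; omega)
      have vx : ((sx ++ [x_train[n]]).drop L).take (H - L) = (sx.drop L).take (H - L) ++ [x_train[n]] := by
        rw [List.drop_append_of_le_length (by simp only [lx]; omega),
            List.take_of_length_le (by simp only [List.length_append, List.length_drop, List.length_cons, List.length_nil, lx]; omega),
            List.take_of_length_le (by simp only [List.length_drop, lx]; omega)]
      have vy : ((sy ++ [y_train[n]]).drop L).take (H - L) = (sy.drop L).take (H - L) ++ [y_train[n]] := by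
        rw [List.drop_append_of_le_length (by simp only [ly]; omega),
            List.take_of_length_le (by simp only [List.length_append, List.length_drop, List.length_cons, List.length_nil, ly]; omega),
            List.take_of_length_le (by simp only [List.length_drop, ly]; omega)]
      simp [hgx, hgy, tx, ty, dx, dy, dx0, dy0, vx, vy]
    · -- element n goes to the remainder
      have hc' : ¬ (L ≤ n ∧ n < H) := fun h => hc (hcond.mpr h)
      rw [if_neg hc]
      by_cases hlo : n < L
      · -- before the fold: take L grows; drop H and the dev slice stay empty
        have tx : (sx ++ [x_train[n]]).take L = sx ++ [x_train[n]] :=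
          List.take_of_length_le (by simp only [List.length_append, List.length_cons, List.length_nil, lx]; omega)
        have tx0 : sx.take L = sx := List.take_of_length_le (by simp only [lx]; omega)
        have ty : (sy ++ [y_train[n]]).take L = sy ++ [y_train[n]] :=
          List.take_of_length_le (by simp only [List.length_append, List.length_cons, List.length_nil, ly]; omega)
        have ty0 : sy.take L = sy := List.take_of_length_le (by simp only [ly]; omega)
        have dx : (sx ++ [x_train[n]]).drop H = [] :=
          List.drop_eq_nil_of_le (by simp only [List.length_append, List.length_cons, List.length_nil, lx]; omega)
        have dx0 : sx.drop H = [] := List.drop_eq_nil_of_le (by simp only [lx]; omega)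
        have dy : (sy ++ [y_train[n]]).drop H = [] :=
          List.drop_eq_nil_of_le (by simp only [List.length_append, List.length_cons, List.length_nil, ly]; omega)
        have dy0 : sy.drop H = [] := List.drop_eq_nil_of_le (by simp only [ly]; omega)
        have vx : (sx ++ [x_train[n]]).drop L = [] :=
          List.drop_eq_nil_of_le (by simp only [List.length_append, List.length_cons, List.length_nil, lx]; omega)
        have vx0 : sx.drop L = [] := List.drop_eq_nil_of_le (by simp only [lx]; omega)
        have vy : (sy ++ [y_train[n]]).drop L = [] :=
          List.drop_eq_nil_of_le (by simp only [List.length_append, List.length_cons, List.length_nil, ly]; omega)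
        have vy0 : sy.drop L = [] := List.drop_eq_nil_of_le (by simp only [ly]; omega)
        simp [hgx, hgy, tx, tx0, ty, ty0, dx, dy, dx0, dy0, vx, vy, vx0, vy0]
      · -- after the fold: drop H grows; take L and the dev slice are unchanged
        have hhi : H ≤ n := by omega
        have tx : (sx ++ [x_train[n]]).take L = sx.take L :=
          List.take_append_of_le_length (by simp only [lx]; omega)
        have ty : (sy ++ [y_train[n]]).take L = sy.take L :=
          List.take_append_of_le_length (by simp only [ly]; omega)
        have dx : (sx ++ [x_train[n]]).drop H = sx.drop H ++ [x_train[n]] :=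
          List.drop_append_of_le_length (by simp only [lx]; omega)
        have dy : (sy ++ [y_train[n]]).drop H = sy.drop H ++ [y_train[n]] :=
          List.drop_append_of_le_length (by simp only [ly]; omega)
        have vx : ((sx ++ [x_train[n]]).drop L).take (H - L) = (sx.drop L).take (H - L) := by
          rw [List.drop_append_of_le_length (by simp only [lx]; omega),
              List.take_append_of_le_length (by simp only [List.length_drop, lx]; omega)]
        have vy : ((sy ++ [y_train[n]]).drop L).take (H - L) = (sy.drop L).take (H - L) := by
          rw [List.drop_append_of_le_length (by simp only [ly]; omega),
              List.take_append_of_le_length (by simp only [List.length_drop, ly]; omega)]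
        simp [hgx, hgy, tx, ty, dx, dy, vx, vy]

-- ===== VERDICT (by name: the statement is the Claim_ definition above) =====
theorem dev_split_spec : Claim_equal_dev_split := by
  intro x_train y_train thiscv devlen _ hpre
  obtain ⟨hlen, hcv, hdl⟩ := hpre
  unfold Spec_dev_split dev_split dev_split_alt
  rw [dev_split_loop_inv x_train y_train thiscv devlen x_train.length le_rfl (le_of_eq hlen)]
  have hstart : (0 : Int) ≤ thiscv * devlen := mul_nonneg hcv hdl
  have hstop : (0 : Int) ≤ thiscv * devlen + devlen := by linarith
  have hmax0 : max 0 (thiscv * devlen) = thiscv * devlen := max_eq_right hstart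
  have hmul : (thiscv + 1) * devlen = thiscv * devlen + devlen := by ring
  have hty : y_train.take x_train.length = y_train := by rw [hlen]; exact List.take_length
  have hmax2 : max (thiscv * devlen) ((thiscv + 1) * devlen) = thiscv * devlen + devlen := by
    rw [hmul]; exact max_eq_right (by linarith)
  simp only [hmax0, hmax2, List.take_length, hty,
    PySem.List.slice_to _ hstart, PySem.List.slice_from _ hstop,
    PySem.List.slice_toNat _ hstart hstop]
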